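-- pv_equiv track=rewrite | github.com/pypi-data/pypi-mirror-230 | packages/sdatta-learning/sdatta_learning-0.0.1.tar.gz/sdatta_learning-0.0.1/model_training/data_spliter.py | get_fold_indexes
-- ===== SOURCE A (Python) =====
-- def get_fold_indexes(n_samples: int, n_folds: int) -> list:
--     """
--     get fold indexes for cross validation.
--     Args:
--         n_samples:  int
--         n_folds:  int
--
--     Returns:     list
--
--     """
--     fold_indexes = []
--     step = n_samples // n_folds
--     for i in range(n_folds):
--         start = i * step
--         end = start + step
--         if i == n_folds - 1:
--             end = n_samples  # Last fold takes remaining samples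
--         fold_indexes.append((start, end))
--     return fold_indexes
-- ===== SOURCE B (Python) =====
-- def get_fold_indexes(n_samples: int, n_folds: int) -> list:
--     step = n_samples // n_folds
--     boundaries = [i * step for i in range(n_folds)] + [n_samples]
--     return list(zip(boundaries, boundaries[1:]))
-- ===== Notes on version B (the rewrite author's own statement) =====
-- stated objective: simpler
-- what changed: B builds a boundaries list with n_samples appended as a sentinel and zips consecutive boundaries, eliminating A's per-iteration last-fold branch and explicit accumulator loop.
import Mathlib
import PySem

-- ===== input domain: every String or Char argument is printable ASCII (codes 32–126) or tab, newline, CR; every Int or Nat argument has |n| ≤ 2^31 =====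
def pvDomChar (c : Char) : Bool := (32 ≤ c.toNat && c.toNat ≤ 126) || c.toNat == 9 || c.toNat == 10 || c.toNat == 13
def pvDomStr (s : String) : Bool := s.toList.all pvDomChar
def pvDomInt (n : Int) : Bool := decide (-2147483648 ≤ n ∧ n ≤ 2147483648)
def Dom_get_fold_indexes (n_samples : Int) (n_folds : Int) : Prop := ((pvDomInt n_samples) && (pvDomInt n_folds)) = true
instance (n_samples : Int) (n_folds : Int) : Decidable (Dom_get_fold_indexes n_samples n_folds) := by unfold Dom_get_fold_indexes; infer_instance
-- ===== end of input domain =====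

-- B replaces A's accumulator loop with its special last-fold branch by a boundaries
-- list (with n_samples as a sentinel final boundary) zipped with its own tail (simpler).

-- ===== PORT A =====
def get_fold_indexes (n_samples : Int) (n_folds : Int) : List (Int × Int) :=
  let step := PySem.Int.floordiv n_samples n_folds
  (PySem.List.pyRange 0 n_folds 1).foldl
    (fun fold_indexes i =>
      let start := i * step
      let end0 := start + step
      let end1 := if i == n_folds - 1 then n_samples else end0
      fold_indexes ++ [(start, end1)]) []

-- ===== PORT B =====
def get_fold_indexes_alt (n_samples : Int) (n_folds : Int) : List (Int × Int) :=
  let step := PySem.Int.floordiv n_samples n_folds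
  let boundaries := (PySem.List.pyRange 0 n_folds 1).map (fun i => i * step) ++ [n_samples]
  boundaries.zip boundaries.tail

-- ===== PRECONDITION & SPEC =====
-- Pre_ excludes exactly n_folds = 0, where the Python A raises ZeroDivisionError (B raises there too).
def Pre_get_fold_indexes (n_samples : Int) (n_folds : Int) : Prop := n_folds ≠ 0
instance (n_samples : Int) (n_folds : Int) : Decidable (Pre_get_fold_indexes n_samples n_folds) := by unfold Pre_get_fold_indexes; infer_instance
def pvWitness_get_fold_indexes : Int × Int := (10, 3)

def Spec_get_fold_indexes (n_samples : Int) (n_folds : Int) (out : List (Int × Int)) : Prop := out = get_fold_indexes_alt n_samples n_folds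
instance (n_samples : Int) (n_folds : Int) (out : List (Int × Int)) : Decidable (Spec_get_fold_indexes n_samples n_folds out) := by unfold Spec_get_fold_indexes; infer_instance

-- ===== CLAIM (what is proved, stated in full; the proofs are below) =====
def Claim_equal_get_fold_indexes : Prop := ∀ (n_samples : Int) (n_folds : Int), Dom_get_fold_indexes n_samples n_folds → Pre_get_fold_indexes n_samples n_folds → Spec_get_fold_indexes n_samples n_folds (get_fold_indexes n_samples n_folds)

-- ===== LEMMAS AND PROOFS =====

-- Common closed form: the fold pairs starting from index i.
def pairsFrom (step ns nf i : Int) : List (Int × Int) :=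
  if h : i < nf then
    (i * step, if i = nf - 1 then ns else (i + 1) * step) :: pairsFrom step ns nf (i + 1)
  else []
termination_by (nf - i).toNat
decreasing_by omega

lemma pairsFrom_of_ge (step ns nf i : Int) (h : nf ≤ i) : pairsFrom step ns nf i = [] := by
  rw [pairsFrom]; simp [Int.not_lt.mpr h]

lemma pairsFrom_of_lt (step ns nf i : Int) (h : i < nf) :
    pairsFrom step ns nf i
      = (i * step, if i = nf - 1 then ns else (i + 1) * step) :: pairsFrom step ns nf (i + 1) := by
  rw [pairsFrom]; simp [h]

-- A's loop, as a map over the range, equals pairsFrom.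
lemma A_map_eq (step ns nf : Int) : ∀ i : Int,
    (PySem.List.pyRange i nf 1).map
        (fun j => (j * step, if j == nf - 1 then ns else j * step + step))
      = pairsFrom step ns nf i := by
  intro i
  by_cases h : i < nf
  · rw [PySem.List.pyRange_one_cons h, pairsFrom_of_lt step ns nf i h]
    simp only [List.map_cons]
    have ih := A_map_eq step ns nf (i + 1)
    rw [ih]
    congr 1
    by_cases he : i = nf - 1 <;> (simp [he]; try ring)
  · rw [PySem.List.pyRange_one_eq_nil (by omega), pairsFrom_of_ge step ns nf i (by omega)]
    rfl
termination_by i => (nf - i).toNat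
decreasing_by omega

-- B's zip of boundaries with its tail equals pairsFrom.
lemma B_zip_eq (step ns nf : Int) : ∀ i : Int,
    ((PySem.List.pyRange i nf 1).map (fun j => j * step) ++ [ns]).zip
        (((PySem.List.pyRange i nf 1).map (fun j => j * step) ++ [ns]).tail)
      = pairsFrom step ns nf i := by
  intro i
  by_cases h : i < nf
  · rw [PySem.List.pyRange_one_cons h, pairsFrom_of_lt step ns nf i h]
    have ih := B_zip_eq step ns nf (i + 1)
    by_cases h2 : i + 1 < nf
    · rw [PySem.List.pyRange_one_cons h2] at ih ⊢
      simp only [List.map_cons, List.cons_append, List.tail_cons, List.zip_cons_cons] at ih ⊢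
      rw [ih]
      have : ¬ (i = nf - 1) := by omega
      simp [this]
    · rw [PySem.List.pyRange_one_eq_nil (by omega)] at ih
      simp only [List.map_nil, List.nil_append, List.tail_cons, List.zip_nil_right] at ih
      have hi : i = nf - 1 := by omega
      simp [hi, pairsFrom_of_ge step ns nf nf le_rfl]
  · rw [PySem.List.pyRange_one_eq_nil (by omega), pairsFrom_of_ge step ns nf i (by omega)]
    rfl
termination_by i => (nf - i).toNat
decreasing_by omega

-- ===== VERDICT (by name: the statement is the Claim_ definition above) =====
theorem get_fold_indexes_spec : Claim_equal_get_fold_indexes := by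
  intro ns nf _ _
  unfold Spec_get_fold_indexes get_fold_indexes get_fold_indexes_alt
  set step := PySem.Int.floordiv ns nf with hstep
  rw [PySem.List.foldl_append_singleton_eq_map, B_zip_eq step ns nf 0, ← A_map_eq step ns nf 0]
  simp
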